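-- pv_equiv track=rewrite | github.com/Mati2206/Matura-Informatyka | maj 2023 formuła 2023/zad2.py | dec_to_bin_modify
-- ===== SOURCE A (Python) =====
-- def check_two(l):
--     pow = 0
--     while True:
--         if (2**pow > l):
--             return pow
--         pow+=1
--
-- def dec_to_bin_modify(l):
--     pow = check_two(l)
--     block = 1
--     block1 = 1
--     block2 = 0
--     m = ""
--     while pow >= 0:
--         if (2**pow <= l):
--             m += "1"
--             if (block == 0):
--                 block = 1
--                 block1 += 1
--             l -= 2**pow
--         elif (m != ""):
--             m += "0"
--             if (block == 1):
--                 block = 0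
--                 block2 += 1
--         pow -= 1
--     return [m, block1, block2]
-- ===== SOURCE B (Python) =====
-- def dec_to_bin_modify(l):
--     # Build the binary string LSB-first by repeated division, then count
--     # runs of equal characters in a single separate pass.
--     digits = []
--     n = l
--     while n > 0:
--         digits.append('1' if n % 2 else '0')
--         n //= 2
--     digits.reverse()
--     m = ''.join(digits)
--     block1 = 0
--     block2 = 0
--     prev = ''
--     for c in m:
--         if c != prev:
--             if c == '1':
--                 block1 += 1
--             else:
--                 block2 += 1
--             prev = c
--     return [m, block1, block2]
-- ===== Notes on version B (the rewrite author's own statement) =====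
-- stated objective: simpler
-- what changed: A's single MSB-greedy subtraction loop (finding the top power of two, then subtracting powers while counting blocks inline) is replaced by repeated division by 2 to build the binary string plus a separate run-counting pass over the string.
-- intended difference: For l = 0 A returns ['', 1, 0], claiming one 1-block in an empty string (leftover initialisation of its counters); B returns ['', 0, 0], the correct block counts of the empty string. — e.g. on dec_to_bin_modify(0): A returns ("", 1, 0), B returns ("", 0, 0)
-- outside the precondition, e.g. on dec_to_bin_modify(-3): A returns ('', 1, 0), B returns ('', 0, 0)
import Mathlib
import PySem

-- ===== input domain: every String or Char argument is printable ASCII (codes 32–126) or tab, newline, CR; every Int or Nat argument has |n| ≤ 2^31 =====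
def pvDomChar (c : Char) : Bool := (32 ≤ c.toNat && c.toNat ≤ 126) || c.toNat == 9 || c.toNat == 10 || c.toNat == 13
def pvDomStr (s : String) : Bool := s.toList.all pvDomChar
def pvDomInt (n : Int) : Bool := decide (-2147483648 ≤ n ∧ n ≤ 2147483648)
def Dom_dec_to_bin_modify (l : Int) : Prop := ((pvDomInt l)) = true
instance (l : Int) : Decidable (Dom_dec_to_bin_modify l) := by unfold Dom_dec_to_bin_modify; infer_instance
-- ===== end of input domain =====

-- B replaces A's MSB-greedy subtraction-and-count loop by repeated-division binary
-- conversion plus a separate run-counting pass (objective: simpler decomposition).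


-- ===== PORT A =====
-- check_two: pow starts at 0 and only increases, so it is kept as a Nat counter.
def check_two_aux (l : Int) (pow : Nat) : Nat :=
  if (2 : Int) ^ pow > l then pow else check_two_aux l (pow + 1)
termination_by (l.toNat + 1) - 2 ^ pow
decreasing_by
  have hle : (2 : Int) ^ pow ≤ l := by omega
  have hc : ((2 ^ pow : Nat) : Int) = (2 : Int) ^ pow := by push_cast; ring
  have h2 : (2 : Nat) ^ pow ≤ l.toNat := by omega
  have h3 : (2 : Nat) ^ pow < 2 ^ (pow + 1) := Nat.pow_lt_pow_right (by omega) (by omega)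
  omega

def check_two (l : Int) : Int := (check_two_aux l 0 : Int)

-- the while loop of dec_to_bin_modify; m is kept as List Char (Python string concat)
def decLoop (l pow block block1 block2 : Int) (m : List Char) : List Char × Int × Int :=
  if _h : 0 ≤ pow then
    if (2 : Int) ^ pow.toNat ≤ l then
      decLoop (l - 2 ^ pow.toNat) (pow - 1)
        (if block = 0 then 1 else block)
        (if block = 0 then block1 + 1 else block1)
        block2 (m ++ ['1'])
    else if m ≠ [] then
      decLoop l (pow - 1)
        (if block = 1 then 0 else block)
        block1
        (if block = 1 then block2 + 1 else block2) (m ++ ['0'])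
    else
      decLoop l (pow - 1) block block1 block2 m
  else (m, block1, block2)
termination_by (pow + 1).toNat
decreasing_by all_goals omega

def dec_to_bin_modify (l : Int) : String × Int × Int :=
  let r := decLoop l (check_two l) 1 1 0 []
  (String.ofList r.1, r.2.1, r.2.2)

-- ===== PORT B =====
-- while n > 0: digits.append('1' if n % 2 else '0'); n //= 2   (LSB first)
def bDigits (n : Int) : List Char :=
  if _h : n > 0 then
    (if PySem.Int.mod n 2 ≠ 0 then '1' else '0') :: bDigits (PySem.Int.floordiv n 2)
  else []
termination_by n.toNat
decreasing_by
  have := PySem.Int.floordiv_eq_ediv_of_pos (a := n) (b := 2) (by omega)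
  have h2 : n / 2 < n := by omega
  omega

-- for c in m: if c != prev: bump the matching counter; prev = c   (prev starts '')
def countRuns : List Char → Int → Int → List Char → Int × Int
  | [], b1, b2, _ => (b1, b2)
  | c :: cs, b1, b2, prev =>
    if [c] ≠ prev then
      if c = '1' then countRuns cs (b1 + 1) b2 [c]
      else countRuns cs b1 (b2 + 1) [c]
    else countRuns cs b1 b2 prev

def dec_to_bin_modify_alt (l : Int) : String × Int × Int :=
  let m := (bDigits l).reverse
  let r := countRuns m 0 0 []
  (String.ofList m, r.1, r.2)

-- ===== PRECONDITION & SPEC =====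
-- Pre_ excludes negative l, outside the natural domain of binary conversion: A's value
-- ['', 1, 0] there is leftover initialisation state, while B naturally returns ['', 0, 0].
def Pre_dec_to_bin_modify (l : Int) : Prop := 0 ≤ l
instance (l : Int) : Decidable (Pre_dec_to_bin_modify l) := by unfold Pre_dec_to_bin_modify; infer_instance
def pvWitness_dec_to_bin_modify : Int := 5

-- For l = 0 A returns ['', 1, 0], claiming one 1-block in an empty string (leftover
-- initialisation of its counters); B returns ['', 0, 0], the correct block counts of
-- the empty string.
def D_dec_to_bin_modify (l : Int) : Prop := l = 0
instance (l : Int) : Decidable (D_dec_to_bin_modify l) := by unfold D_dec_to_bin_modify; infer_instance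

def Spec_dec_to_bin_modify (l : Int) (out : String × Int × Int) : Prop :=
  ¬ D_dec_to_bin_modify l → out = dec_to_bin_modify_alt l
instance (l : Int) (out : String × Int × Int) : Decidable (Spec_dec_to_bin_modify l out) := by
  unfold Spec_dec_to_bin_modify; infer_instance

def pvDiffWitness_dec_to_bin_modify : Int := 0
def pvDiffWitnessOut_dec_to_bin_modify : (String × Int × Int) × (String × Int × Int) :=
  (("", 1, 0), ("", 0, 0))

-- ===== CLAIM (what is proved, stated in full; the proofs are below) =====
def Claim_unchanged_dec_to_bin_modify : Prop :=
  ∀ (l : Int), Dom_dec_to_bin_modify l → Pre_dec_to_bin_modify l →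
    Spec_dec_to_bin_modify l (dec_to_bin_modify l)
def Claim_changed_dec_to_bin_modify : Prop :=
  Dom_dec_to_bin_modify (pvDiffWitness_dec_to_bin_modify) ∧
  Pre_dec_to_bin_modify (pvDiffWitness_dec_to_bin_modify) ∧
  D_dec_to_bin_modify (pvDiffWitness_dec_to_bin_modify) ∧
  dec_to_bin_modify (pvDiffWitness_dec_to_bin_modify) = pvDiffWitnessOut_dec_to_bin_modify.1 ∧
  dec_to_bin_modify_alt (pvDiffWitness_dec_to_bin_modify) = pvDiffWitnessOut_dec_to_bin_modify.2 ∧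
  pvDiffWitnessOut_dec_to_bin_modify.1 ≠ pvDiffWitnessOut_dec_to_bin_modify.2
def Claim_exact_dec_to_bin_modify : Prop :=
  ∀ (l : Int), Dom_dec_to_bin_modify l → Pre_dec_to_bin_modify l → D_dec_to_bin_modify l →
    dec_to_bin_modify l ≠ dec_to_bin_modify_alt l

-- ===== LEMMAS AND PROOFS =====

-- A's per-character counter update (block, block1, block2) as a fold step.
def stepA (s : Int × Int × Int) (c : Char) : Int × Int × Int :=
  if c = '1' then
    (if s.1 = 0 then 1 else s.1, if s.1 = 0 then s.2.1 + 1 else s.2.1, s.2.2)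
  else
    (if s.1 = 1 then 0 else s.1, s.2.1, if s.1 = 1 then s.2.2 + 1 else s.2.2)

-- the n-character fixed-width binary string of l (MSB first), as A's greedy loop emits it
def fixedBits : Nat → Int → List Char
  | 0, _ => []
  | n + 1, l => if 2 ^ n ≤ l then '1' :: fixedBits n (l - 2 ^ n) else '0' :: fixedBits n l

-- the n-character fixed-width binary digits of l, LSB first, as B's division loop emits them
def lsbFix : Nat → Int → List Char
  | 0, _ => []
  | n + 1, l => (if l % 2 = 1 then '1' else '0') :: lsbFix n (l / 2)

-- the common value both programs compute for l ≥ 1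
def aResult (l : Int) : List Char × Int × Int :=
  let p := PySem.Int.bitLength l - 1
  ('1' :: fixedBits p (l - 2 ^ p),
   ((fixedBits p (l - 2 ^ p)).foldl stepA (1, 1, 0)).2)

theorem fixedBits_mem : ∀ (n : Nat) (l : Int) (x : Char), x ∈ fixedBits n l → x = '0' ∨ x = '1' := by
  intro n
  induction n with
  | zero => simp [fixedBits]
  | succ n ih =>
    intro l x hx
    simp only [fixedBits] at hx
    split at hx <;> rcases List.mem_cons.mp hx with h | h <;>
      first | (subst h; simp) | exact ih _ _ h

-- A's main loop after the first '1' has been emitted (m ≠ []): it appends the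
-- fixed-width bits of l and folds stepA over them.
theorem decLoop_phase2 : ∀ (n : Nat) (l b b1 b2 : Int) (m : List Char), m ≠ [] → 0 ≤ l → l < 2 ^ n →
    decLoop l ((n : Int) - 1) b b1 b2 m =
      (m ++ fixedBits n l, ((fixedBits n l).foldl stepA (b, b1, b2)).2) := by
  intro n
  induction n with
  | zero =>
    intro l b b1 b2 m hm h0 hlt
    rw [decLoop]
    simp [fixedBits]
  | succ n ih =>
    intro l b b1 b2 m hm h0 hlt
    have hcast : ((n + 1 : Nat) : Int) - 1 = (n : Int) := by push_cast; ring
    have hpow : (2 : Int) ^ (n + 1) = 2 ^ n * 2 := pow_succ 2 n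
    rw [hcast, decLoop, dif_pos (by positivity)]
    simp only [Int.toNat_natCast]
    by_cases hc : (2 : Int) ^ n ≤ l
    · rw [if_pos hc]
      rw [ih (l - 2 ^ n) _ _ _ (m ++ ['1']) (by simp) (by omega) (by omega)]
      simp [fixedBits, hc, stepA, List.append_assoc]
    · rw [if_neg hc, if_pos hm]
      rw [ih l _ _ _ (m ++ ['0']) (by simp) h0 (by omega)]
      simp [fixedBits, hc, stepA, List.append_assoc]

theorem bitLength_eq : ∀ (n : Nat) (l : Int), 2 ^ n ≤ l → l < 2 ^ (n + 1) →
    PySem.Int.bitLength l = n + 1 := by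
  intro n
  induction n with
  | zero =>
    intro l h1 h2
    have : l = 1 := by norm_num at h1 h2; omega
    subst this; decide
  | succ n ih =>
    intro l h1 h2
    have hp1 : (2 : Int) ^ (n + 1) = 2 ^ n * 2 := pow_succ 2 n
    have hp2 : (2 : Int) ^ (n + 2) = 2 ^ (n + 1) * 2 := pow_succ 2 (n + 1)
    have hpos : (0 : Int) < l := lt_of_lt_of_le (by positivity) h1
    have hf : PySem.Int.floordiv l 2 = l / 2 := PySem.Int.floordiv_eq_ediv_of_pos (by norm_num)
    have hdm : 2 * (l / 2) + l % 2 = l := Int.ediv_add_emod l 2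
    have hm0 : 0 ≤ l % 2 := Int.emod_nonneg l (by norm_num)
    have hm2 : l % 2 < 2 := Int.emod_lt_of_pos l (by norm_num)
    rw [PySem.Int.bitLength_of_pos hpos, hf, ih (l / 2) (by omega) (by omega)]

-- A's main loop while m is still empty: leading zeros are skipped, and the result is aResult l.
theorem decLoop_phase1 : ∀ (n : Nat) (l : Int), 1 ≤ l → l < 2 ^ n →
    decLoop l ((n : Int) - 1) 1 1 0 [] = aResult l := by
  intro n
  induction n with
  | zero =>
    intro l h1 h2
    norm_num at h2; omega
  | succ n ih =>
    intro l h1 h2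
    have hcast : ((n + 1 : Nat) : Int) - 1 = (n : Int) := by push_cast; ring
    have hpow : (2 : Int) ^ (n + 1) = 2 ^ n * 2 := pow_succ 2 n
    rw [hcast, decLoop, dif_pos (by positivity)]
    simp only [Int.toNat_natCast]
    by_cases hc : (2 : Int) ^ n ≤ l
    · rw [if_pos hc]
      have hb : PySem.Int.bitLength l = n + 1 := bitLength_eq n l hc h2
      norm_num
      rw [decLoop_phase2 n (l - 2 ^ n) _ _ _ ['1'] (by simp) (by omega) (by omega)]
      simp only [aResult, hb]
      norm_num
    · rw [if_neg hc]
      simp only [ne_eq, not_true_eq_false]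
      exact ih l h1 (by omega)

theorem checkAux_gt (l : Int) (p : Nat) : l < 2 ^ check_two_aux l p := by
  fun_induction check_two_aux
  case case1 h => omega
  case case2 h ih => exact ih

theorem A_eq (l : Int) (h : 1 ≤ l) :
    dec_to_bin_modify l = (String.ofList (aResult l).1, (aResult l).2.1, (aResult l).2.2) := by
  have hk : l < 2 ^ check_two_aux l 0 := checkAux_gt l 0
  have hcast : (check_two l : Int) = ((check_two_aux l 0 + 1 : Nat) : Int) - 1 := by
    simp [check_two]
  have hlt : l < 2 ^ (check_two_aux l 0 + 1) := by
    have h2 : (2 : Int) ^ check_two_aux l 0 ≤ 2 ^ (check_two_aux l 0 + 1) :=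
      pow_le_pow_right₀ (by norm_num) (by omega)
    omega
  simp only [dec_to_bin_modify]
  rw [hcast, decLoop_phase1 (check_two_aux l 0 + 1) l h hlt]

-- ---- B side ----

theorem fixedBits_peel : ∀ (n : Nat) (l : Int), 0 ≤ l → l < 2 ^ (n + 1) →
    fixedBits (n + 1) l = fixedBits n (l / 2) ++ [if l % 2 = 1 then '1' else '0'] := by
  intro n
  induction n with
  | zero =>
    intro l h0 h2
    have : l = 0 ∨ l = 1 := by norm_num at h2; omega
    rcases this with h | h <;> subst h <;> decide
  | succ n ih =>
    intro l h0 h2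
    have hdm : 2 * (l / 2) + l % 2 = l := Int.ediv_add_emod l 2
    have hm0 : 0 ≤ l % 2 := Int.emod_nonneg l (by norm_num)
    have hm2 : l % 2 < 2 := Int.emod_lt_of_pos l (by norm_num)
    have hp1 : (2 : Int) ^ (n + 1) = 2 ^ n * 2 := pow_succ 2 n
    have hp2 : (2 : Int) ^ (n + 2) = 2 ^ (n + 1) * 2 := pow_succ 2 (n + 1)
    have hiff : ((2 : Int) ^ n ≤ l / 2) ↔ (2 : Int) ^ (n + 1) ≤ l := by omega
    by_cases hc : (2 : Int) ^ (n + 1) ≤ l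
    · have hc' : (2 : Int) ^ n ≤ l / 2 := hiff.mpr hc
      have hdiv : (l - 2 ^ (n + 1)) / 2 = l / 2 - 2 ^ n := by
        have := Int.add_mul_ediv_right l (-(2 ^ n : Int)) (by norm_num : (2:Int) ≠ 0)
        rw [hp1]; omega
      have hmod : (l - 2 ^ (n + 1)) % 2 = l % 2 := by
        rw [Int.sub_emod, hp1]
        simp [Int.mul_emod_left]
      show fixedBits (n + 2) l = _
      rw [show fixedBits (n + 2) l = '1' :: fixedBits (n + 1) (l - 2 ^ (n + 1)) from by
            simp [fixedBits, hc],
          show fixedBits (n + 1) (l / 2) = '1' :: fixedBits n (l / 2 - 2 ^ n) from by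
            simp [fixedBits, hc'],
          ih (l - 2 ^ (n + 1)) (by omega) (by omega), hdiv, hmod]
      simp
    · have hc' : ¬ (2 : Int) ^ n ≤ l / 2 := fun h => hc (hiff.mp h)
      show fixedBits (n + 2) l = _
      rw [show fixedBits (n + 2) l = '0' :: fixedBits (n + 1) l from by simp [fixedBits, hc],
          show fixedBits (n + 1) (l / 2) = '0' :: fixedBits n (l / 2) from by
            simp [fixedBits, hc'],
          ih l h0 (by omega)]
      simp

theorem lsbFix_reverse : ∀ (n : Nat) (l : Int), 0 ≤ l → l < 2 ^ n →
    (lsbFix n l).reverse = fixedBits n l := by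
  intro n
  induction n with
  | zero => intro l _ _; simp [lsbFix, fixedBits]
  | succ n ih =>
    intro l h0 h2
    have hdm : 2 * (l / 2) + l % 2 = l := Int.ediv_add_emod l 2
    have hm0 : 0 ≤ l % 2 := Int.emod_nonneg l (by norm_num)
    have hm2 : l % 2 < 2 := Int.emod_lt_of_pos l (by norm_num)
    have hp1 : (2 : Int) ^ (n + 1) = 2 ^ n * 2 := pow_succ 2 n
    rw [lsbFix, List.reverse_cons, ih (l / 2) (by omega) (by omega),
        fixedBits_peel n l h0 h2]

theorem bDigits_eq_lsbFix : ∀ (n : Nat) (l : Int), 2 ^ n ≤ l → l < 2 ^ (n + 1) →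
    bDigits l = lsbFix (n + 1) l := by
  intro n
  induction n with
  | zero =>
    intro l h1 h2
    have : l = 1 := by norm_num at h1 h2; omega
    subst this
    rw [bDigits, dif_pos (by decide)]
    rw [bDigits, dif_neg (by decide)]
    decide
  | succ n ih =>
    intro l h1 h2
    have hp1 : (2 : Int) ^ (n + 1) = 2 ^ n * 2 := pow_succ 2 n
    have hp2 : (2 : Int) ^ (n + 2) = 2 ^ (n + 1) * 2 := pow_succ 2 (n + 1)
    have hpos : (0 : Int) < l := lt_of_lt_of_le (by positivity) h1
    have hm : PySem.Int.mod l 2 = l % 2 := PySem.Int.mod_eq_emod_of_pos (by norm_num)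
    have hf : PySem.Int.floordiv l 2 = l / 2 := PySem.Int.floordiv_eq_ediv_of_pos (by norm_num)
    have hdm : 2 * (l / 2) + l % 2 = l := Int.ediv_add_emod l 2
    have hm0 : 0 ≤ l % 2 := Int.emod_nonneg l (by norm_num)
    have hm2 : l % 2 < 2 := Int.emod_lt_of_pos l (by norm_num)
    rw [bDigits, dif_pos (by omega), hm, hf, ih (l / 2) (by omega) (by omega)]
    show _ = lsbFix (n + 2) l
    rw [show lsbFix (n + 2) l = (if l % 2 = 1 then '1' else '0') :: lsbFix (n + 1) (l / 2)
          from rfl]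
    congr 1
    have : l % 2 = 0 ∨ l % 2 = 1 := by omega
    rcases this with h | h <;> simp [h]

-- B's run-counting loop is the fold of A's counter update over the same characters.
theorem countRuns_eq_fold : ∀ (cs : List Char) (b1 b2 : Int) (c : Char),
    (∀ x ∈ cs, x = '0' ∨ x = '1') → (c = '0' ∨ c = '1') →
    countRuns cs b1 b2 [c] = ((cs.foldl stepA ((if c = '1' then 1 else 0), b1, b2)).2) := by
  intro cs
  induction cs with
  | nil => intro b1 b2 c _ _; simp [countRuns]
  | cons x cs ih =>
    intro b1 b2 c hall hc
    have hx := hall x (by simp)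
    have hall' : ∀ y ∈ cs, y = '0' ∨ y = '1' := fun y hy => hall y (by simp [hy])
    rcases hx with hx | hx <;> subst hx <;> rcases hc with hc | hc <;> subst hc
    · calc countRuns ('0' :: cs) b1 b2 ['0'] = countRuns cs b1 b2 ['0'] := rfl
        _ = (List.foldl stepA ((if ('0' : Char) = '1' then 1 else 0), b1, b2) cs).2 :=
            ih b1 b2 '0' hall' (Or.inl rfl)
        _ = _ := rfl
    · calc countRuns ('0' :: cs) b1 b2 ['1'] = countRuns cs b1 (b2 + 1) ['0'] := rfl
        _ = (List.foldl stepA ((if ('0' : Char) = '1' then 1 else 0), b1, b2 + 1) cs).2 :=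
            ih b1 (b2 + 1) '0' hall' (Or.inl rfl)
        _ = _ := rfl
    · calc countRuns ('1' :: cs) b1 b2 ['0'] = countRuns cs (b1 + 1) b2 ['1'] := rfl
        _ = (List.foldl stepA ((if ('1' : Char) = '1' then 1 else 0), b1 + 1, b2) cs).2 :=
            ih (b1 + 1) b2 '1' hall' (Or.inr rfl)
        _ = _ := rfl
    · calc countRuns ('1' :: cs) b1 b2 ['1'] = countRuns cs b1 b2 ['1'] := rfl
        _ = (List.foldl stepA ((if ('1' : Char) = '1' then 1 else 0), b1, b2) cs).2 :=
            ih b1 b2 '1' hall' (Or.inr rfl)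
        _ = _ := rfl

theorem B_eq (l : Int) (h : 1 ≤ l) :
    dec_to_bin_modify_alt l = (String.ofList (aResult l).1, (aResult l).2.1, (aResult l).2.2) := by
  obtain ⟨n, hn1, hn2⟩ : ∃ n : Nat, 2 ^ n ≤ l ∧ l < 2 ^ (n + 1) := by
    refine ⟨Nat.log 2 l.toNat, ?_, ?_⟩
    · have := Nat.pow_log_le_self 2 (show l.toNat ≠ 0 by omega)
      have hc : ((2 ^ Nat.log 2 l.toNat : Nat) : Int) = (2 : Int) ^ Nat.log 2 l.toNat := by
        push_cast; ring
      omega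
    · have := Nat.lt_pow_succ_log_self (by norm_num : 1 < 2) l.toNat
      have hc : ((2 ^ (Nat.log 2 l.toNat + 1) : Nat) : Int) = (2 : Int) ^ (Nat.log 2 l.toNat + 1) := by
        push_cast; ring
      omega
  have hb : PySem.Int.bitLength l = n + 1 := bitLength_eq n l hn1 hn2
  have hbd : bDigits l = lsbFix (n + 1) l := bDigits_eq_lsbFix n l hn1 hn2
  have hrev : (lsbFix (n + 1) l).reverse = fixedBits (n + 1) l :=
    lsbFix_reverse (n + 1) l (by omega) hn2
  have hfix : fixedBits (n + 1) l = '1' :: fixedBits n (l - 2 ^ n) := by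
    simp [fixedBits, hn1]
  simp only [dec_to_bin_modify_alt, hbd, hrev, hfix]
  have hcr : countRuns ('1' :: fixedBits n (l - 2 ^ n)) 0 0 [] =
      countRuns (fixedBits n (l - 2 ^ n)) 1 0 ['1'] := rfl
  rw [hcr, countRuns_eq_fold _ 1 0 '1' (fun x hx => fixedBits_mem n _ x hx) (Or.inr rfl)]
  simp only [aResult, hb, Nat.add_sub_cancel, if_true]

theorem A_zero : dec_to_bin_modify 0 = ("", 1, 0) := by
  have h1 : check_two_aux 0 0 = 0 := by rw [check_two_aux]; norm_num
  have h2 : check_two 0 = 0 := by simp [check_two, h1]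
  rw [dec_to_bin_modify]
  simp only [h2]
  rw [decLoop, dif_pos (by norm_num)]
  norm_num
  rw [decLoop, dif_neg (by norm_num)]
  constructor <;> rfl

theorem B_zero : dec_to_bin_modify_alt 0 = ("", 0, 0) := by
  rw [dec_to_bin_modify_alt, bDigits, dif_neg (by norm_num)]
  simp [countRuns]

-- ===== VERDICT (by name: the statement is the Claim_ definition above) =====
theorem dec_to_bin_modify_spec : Claim_unchanged_dec_to_bin_modify := by
  intro l _ hpre hD
  have h1 : 1 ≤ l := by
    unfold Pre_dec_to_bin_modify at hpre
    unfold D_dec_to_bin_modify at hD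
    omega
  rw [A_eq l h1, B_eq l h1]

theorem dec_to_bin_modify_changed : Claim_changed_dec_to_bin_modify := by
  unfold Claim_changed_dec_to_bin_modify
  refine ⟨by decide, by decide, by decide, A_zero, B_zero, by decide⟩

theorem dec_to_bin_modify_tight : Claim_exact_dec_to_bin_modify := by
  intro l _ _ hD
  unfold D_dec_to_bin_modify at hD
  subst hD
  rw [A_zero, B_zero]
  decide
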